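-- pv_equiv track=rewrite | github.com/junrui-liu/coding-problems | kickstart/19_practice.py | alarm_naive
-- ===== SOURCE A (Python) =====
-- def alarm_naive(ns,k):
--   def dot(xs, ys):
--     return sum(x * y for x,y in zip(xs, ys))
--   s = 0
--   for ki in range(1,k+1):
--     for i in range(len(ns)):
--       for j in range(i, len(ns)):
--         v = [b**ki for b in range(1,j-i+2)]
--         s += dot(ns[i:j+1], v)
--   return s % 1000000007
-- ===== SOURCE B (Python) =====
-- def alarm_naive(ns, k):
--     # One pass per exponent: each ns[p] contributes with total weight
--     # (n - p) * sum_{w=1}^{p+1} w**ki, accumulated via a running prefix sum.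
--     n = len(ns)
--     s = 0
--     for ki in range(1, k + 1):
--         pref = 0
--         for p in range(n):
--             pref += (p + 1) ** ki
--             s += ns[p] * (n - p) * pref
--     return s % 1000000007
-- ===== Notes on version B (the rewrite author's own statement) =====
-- stated objective: faster
-- what changed: Instead of enumerating all subarrays and building a power list for each, B reorders the sums: element ns[p] contributes ns[p]*(n-p)*sum_{w=1}^{p+1} w^ki, accumulated with a running prefix of powers, one pass per exponent.
import Mathlib
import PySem

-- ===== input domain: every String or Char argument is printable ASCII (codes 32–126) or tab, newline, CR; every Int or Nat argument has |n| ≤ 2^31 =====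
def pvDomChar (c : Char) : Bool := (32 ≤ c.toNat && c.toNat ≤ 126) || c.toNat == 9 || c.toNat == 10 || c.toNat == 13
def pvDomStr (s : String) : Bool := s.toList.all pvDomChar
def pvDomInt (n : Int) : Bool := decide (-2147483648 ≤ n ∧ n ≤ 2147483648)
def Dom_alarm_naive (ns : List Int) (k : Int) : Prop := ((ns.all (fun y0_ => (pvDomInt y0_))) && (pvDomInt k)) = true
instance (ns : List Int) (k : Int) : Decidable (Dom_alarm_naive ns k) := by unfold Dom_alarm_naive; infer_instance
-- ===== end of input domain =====

-- B replaces A's enumeration of all subarrays by a reordering of the sums (each element's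
-- weight is (n-p)·Σ_{w=1}^{p+1} w^ki, kept as a running prefix), one pass per exponent: faster.

-- ===== PORT A =====
-- the nested 'dot' helper of A
def dotA (xs ys : List Int) : Int := (xs.zip ys).foldl (fun a q => a + q.1 * q.2) 0

def alarm_naive (ns : List Int) (k : Int) : Int :=
  PySem.Int.mod
    ((PySem.List.pyRange 1 (k+1) 1).foldl (fun s ki =>
      (PySem.List.pyRange 0 (ns.length : Int) 1).foldl (fun s i =>
        (PySem.List.pyRange i (ns.length : Int) 1).foldl (fun s j =>
          -- b**ki: ki is drawn from range(1,k+1), so ki ≥ 1 and b ^ ki.toNat is exact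
          let v := (PySem.List.pyRange 1 (j - i + 2) 1).map (fun b => b ^ ki.toNat)
          s + dotA (PySem.List.slice ns (some i) (some (j+1))) v) s) s) 0)
    1000000007

-- ===== PORT B =====
def alarm_naive_alt (ns : List Int) (k : Int) : Int :=
  PySem.Int.mod
    ((PySem.List.pyRange 1 (k+1) 1).foldl (fun s ki =>
      ((PySem.List.pyRange 0 (ns.length : Int) 1).foldl (fun (acc : Int × Int) p =>
          -- (p+1)**ki: ki ≥ 1 here, so ki.toNat is exact; ns[p]: p ∈ range(n), so pyGetD is exact
          let pref := acc.2 + (p + 1) ^ ki.toNat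
          (acc.1 + PySem.List.pyGetD ns p 0 * ((ns.length : Int) - p) * pref, pref)) (s, 0)).1) 0)
    1000000007

-- ===== PRECONDITION & SPEC =====
def Spec_alarm_naive (ns : List Int) (k : Int) (out : Int) : Prop := out = alarm_naive_alt ns k
instance (ns : List Int) (k : Int) (out : Int) : Decidable (Spec_alarm_naive ns k out) := by unfold Spec_alarm_naive; infer_instance

-- ===== CLAIM (what is proved, stated in full; the proofs are below) =====
def Claim_equal_alarm_naive : Prop := ∀ (ns : List Int) (k : Int), Dom_alarm_naive ns k → Spec_alarm_naive ns k (alarm_naive ns k)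

-- ===== LEMMAS AND PROOFS =====

lemma sum_map_range (n : ℕ) (f : ℕ → ℤ) : ((List.range n).map f).sum = ∑ i ∈ Finset.range n, f i := by
  induction n with
  | zero => simp
  | succ n ih => rw [List.range_succ, List.map_append, List.sum_append, Finset.sum_range_succ, ih]; simp

-- A's dot of xs with ys is the sum of pointwise products up to the shorter length.
lemma dotA_eq (xs ys : List Int) :
    dotA xs ys = ∑ t ∈ Finset.range (min xs.length ys.length), xs.getD t 0 * ys.getD t 0 := by
  unfold dotA
  rw [PySem.List.foldl_add, zero_add]
  induction xs generalizing ys with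
  | nil => simp
  | cons x xs ih =>
    cases ys with
    | nil => simp
    | cons y ys =>
      simp only [List.zip_cons_cons, List.map_cons, List.sum_cons, List.length_cons]
      rw [ih ys, Nat.succ_min_succ, Finset.sum_range_succ']
      simp only [List.getD_cons_succ, List.getD_cons_zero]
      ring

lemma sum_reflect_succ (m : ℕ) (h : ℕ → ℤ) :
    ∑ j ∈ Finset.range m, h (m - j) = ∑ j ∈ Finset.range m, h (j + 1) := by
  have := Finset.sum_range_reflect (fun j => h (j + 1)) m
  rw [← this]; apply Finset.sum_congr rfl; intro j hj; simp at hj; congr 1; omega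

-- triangle swap: pairs (i,t) with i+t < m, regrouped by p = i+t
lemma tri_swap (m : ℕ) (g h : ℕ → ℤ) :
    ∑ i ∈ Finset.range m, ∑ t ∈ Finset.range (m - i), g (i + t) * h t
      = ∑ p ∈ Finset.range m, g p * ∑ t ∈ Finset.range (p + 1), h t := by
  induction m with
  | zero => simp
  | succ m ih =>
    rw [Finset.sum_range_succ, Finset.sum_range_succ (f := fun p => g p * ∑ t ∈ Finset.range (p+1), h t)]
    have h1 : ∀ i ∈ Finset.range m,
        ∑ t ∈ Finset.range (m + 1 - i), g (i + t) * h t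
          = (∑ t ∈ Finset.range (m - i), g (i + t) * h t) + g m * h (m - i) := by
      intro i hi
      simp only [Finset.mem_range] at hi
      have h2 : m + 1 - i = (m - i) + 1 := by omega
      have h2' : i + (m - i) = m := by omega
      rw [h2, Finset.sum_range_succ, h2']
    rw [Finset.sum_congr rfl h1, Finset.sum_add_distrib, ih]
    have h3 : ∑ i ∈ Finset.range m, g m * h (m - i) = g m * ∑ j ∈ Finset.range m, h (j + 1) := by
      rw [← Finset.mul_sum]
      congr 1
      exact sum_reflect_succ m h
    rw [h3]
    have h4 : ∑ t ∈ Finset.range (m + 1 - m), g (m + t) * h t = g m * h 0 := by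
      simp
    rw [h4]
    rw [Finset.sum_range_succ' h m]
    ring

-- the main reordering identity behind B
lemma main_swap (n : ℕ) (g h : ℕ → ℤ) :
    ∑ i ∈ Finset.range n, ∑ d ∈ Finset.range (n - i), ∑ t ∈ Finset.range (d + 1), g (i + t) * h t
      = ∑ p ∈ Finset.range n, g p * ((n : ℤ) - (p : ℤ)) * ∑ t ∈ Finset.range (p + 1), h t := by
  induction n with
  | zero => simp
  | succ n ih =>
    have lhs_step : ∑ i ∈ Finset.range (n+1), ∑ d ∈ Finset.range (n + 1 - i), ∑ t ∈ Finset.range (d + 1), g (i + t) * h t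
        = (∑ i ∈ Finset.range n, ∑ d ∈ Finset.range (n - i), ∑ t ∈ Finset.range (d + 1), g (i + t) * h t)
          + ∑ i ∈ Finset.range (n+1), ∑ t ∈ Finset.range (n + 1 - i), g (i + t) * h t := by
      rw [Finset.sum_range_succ]
      have h1 : ∀ i ∈ Finset.range n,
          ∑ d ∈ Finset.range (n + 1 - i), ∑ t ∈ Finset.range (d + 1), g (i + t) * h t
            = (∑ d ∈ Finset.range (n - i), ∑ t ∈ Finset.range (d + 1), g (i + t) * h t)
              + ∑ t ∈ Finset.range (n - i + 1), g (i + t) * h t := by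
        intro i hi
        simp only [Finset.mem_range] at hi
        have h2 : n + 1 - i = (n - i) + 1 := by omega
        rw [h2, Finset.sum_range_succ]
      rw [Finset.sum_congr rfl h1, Finset.sum_add_distrib]
      have h3 : ∑ d ∈ Finset.range (n + 1 - n), ∑ t ∈ Finset.range (d + 1), g (n + t) * h t
          = ∑ t ∈ Finset.range 1, g (n + t) * h t := by
        simp
      rw [h3]
      rw [Finset.sum_range_succ (f := fun i => ∑ t ∈ Finset.range (n + 1 - i), g (i + t) * h t)]
      have h5 : ∀ i ∈ Finset.range n, ∑ t ∈ Finset.range (n + 1 - i), g (i + t) * h t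
          = ∑ t ∈ Finset.range (n - i + 1), g (i + t) * h t := by
        intro i hi; simp only [Finset.mem_range] at hi
        congr 2; omega
      rw [Finset.sum_congr rfl h5]
      have h6 : ∑ t ∈ Finset.range (n + 1 - n), g (n + t) * h t = ∑ t ∈ Finset.range 1, g (n + t) * h t := by
        simp
      rw [h6]
      ring
    rw [lhs_step, ih, tri_swap (n+1) g h]
    have rhs_step : ∑ p ∈ Finset.range (n+1), g p * (((n+1 : ℕ) : ℤ) - (p : ℤ)) * ∑ t ∈ Finset.range (p + 1), h t
        = (∑ p ∈ Finset.range n, g p * ((n : ℤ) - (p : ℤ)) * ∑ t ∈ Finset.range (p + 1), h t)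
          + ∑ p ∈ Finset.range (n+1), g p * ∑ t ∈ Finset.range (p + 1), h t := by
      have h1 : ∀ p ∈ Finset.range (n+1), g p * (((n+1 : ℕ) : ℤ) - (p : ℤ)) * ∑ t ∈ Finset.range (p + 1), h t
          = g p * ((n : ℤ) - (p : ℤ)) * (∑ t ∈ Finset.range (p + 1), h t) + g p * ∑ t ∈ Finset.range (p + 1), h t := by
        intro p _; push_cast; ring
      rw [Finset.sum_congr rfl h1, Finset.sum_add_distrib]
      congr 1
      rw [Finset.sum_range_succ]
      simp
    rw [rhs_step]

-- A's two inner loops, for one exponent e, as the triple sum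
lemma amountA (ns : List Int) (e : ℕ) (s : Int) :
    (PySem.List.pyRange 0 (ns.length : Int) 1).foldl (fun s i =>
        (PySem.List.pyRange i (ns.length : Int) 1).foldl (fun s j =>
          let v := (PySem.List.pyRange 1 (j - i + 2) 1).map (fun b => b ^ e)
          s + dotA (PySem.List.slice ns (some i) (some (j+1))) v) s) s
      = s + ∑ i ∈ Finset.range ns.length, ∑ d ∈ Finset.range (ns.length - i),
          ∑ t ∈ Finset.range (d + 1), ns.getD (i + t) 0 * (1 + (t : ℤ)) ^ e := by
  have hinner : ∀ (acc i : ℤ),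
      (PySem.List.pyRange i (ns.length : Int) 1).foldl (fun s j =>
          let v := (PySem.List.pyRange 1 (j - i + 2) 1).map (fun b => b ^ e)
          s + dotA (PySem.List.slice ns (some i) (some (j+1))) v) acc
        = acc + ((PySem.List.pyRange i (ns.length : Int) 1).map (fun j =>
            dotA (PySem.List.slice ns (some i) (some (j+1)))
              ((PySem.List.pyRange 1 (j - i + 2) 1).map (fun b => b ^ e)))).sum :=
    fun acc i => PySem.List.foldl_add _ _ acc
  rw [PySem.List.foldl_congr_mem _ _
      (fun acc i => acc + ((PySem.List.pyRange i (ns.length : Int) 1).map (fun j =>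
        dotA (PySem.List.slice ns (some i) (some (j+1)))
          ((PySem.List.pyRange 1 (j - i + 2) 1).map (fun b => b ^ e)))).sum) s
      (fun acc x _ => hinner acc x)]
  rw [PySem.List.foldl_add]
  congr 1
  rw [PySem.List.pyRange_zero_natCast, List.map_map, sum_map_range]
  apply Finset.sum_congr rfl
  intro a ha
  simp only [Finset.mem_range] at ha
  simp only [Function.comp]
  rw [PySem.List.pyRange_one, Int.toNat_sub, List.map_map, sum_map_range]
  apply Finset.sum_congr rfl
  intro d hd
  simp only [Finset.mem_range] at hd
  simp only [Function.comp]
  have e1 : (a : ℤ) + (d : ℤ) + 1 = (a : ℤ) + ((d + 1 : ℕ) : ℤ) := by push_cast; ring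
  have e2 : (a : ℤ) + (d : ℤ) - (a : ℤ) + 2 = ((d : ℤ) + 2) := by ring
  rw [e1, PySem.List.slice_natCast_add, e2, PySem.List.pyRange_one, List.map_map]
  have e3 : ((d : ℤ) + 2 - 1).toNat = d + 1 := by omega
  rw [e3, dotA_eq]
  simp only [List.length_take, List.length_drop, List.length_map, List.length_range]
  rw [show min (min (d + 1) (ns.length - a)) (d + 1) = d + 1 from by omega]
  apply Finset.sum_congr rfl
  intro t ht
  simp only [Finset.mem_range] at ht
  have e5 : (List.take (d + 1) (List.drop a ns)).getD t 0 = ns.getD (a + t) 0 := by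
    rw [List.getD_eq_getElem?_getD, List.getElem?_take_of_lt ht, List.getElem?_drop,
      ← List.getD_eq_getElem?_getD]
  rw [e5, PySem.List.getD_map_range _ _ _ _ ht]
  rfl

-- B's inner loop as a pair of closed sums (running prefix of powers)
lemma amountB_aux (ns : List Int) (e : ℕ) (N s : ℤ) (n : ℕ) :
    (List.range n).foldl (fun (acc : ℤ × ℤ) (p : ℕ) =>
        (acc.1 + PySem.List.pyGetD ns (↑p) 0 * (N - ↑p) * (acc.2 + ((p : ℤ) + 1) ^ e),
         acc.2 + ((p : ℤ) + 1) ^ e)) (s, 0)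
      = (s + ∑ p ∈ Finset.range n, ns.getD p 0 * (N - (p : ℤ)) * ∑ t ∈ Finset.range (p + 1), ((t : ℤ) + 1) ^ e,
         ∑ t ∈ Finset.range n, ((t : ℤ) + 1) ^ e) := by
  induction n with
  | zero => simp
  | succ n ih =>
    rw [List.range_succ, List.foldl_append, ih]
    simp only [List.foldl_cons, List.foldl_nil, PySem.List.pyGetD_natCast]
    rw [Finset.sum_range_succ, Finset.sum_range_succ (f := fun t => ((t : ℤ) + 1) ^ e)]
    exact Prod.ext (by dsimp; ring) rfl

-- B's inner loop, for one exponent e, as the weighted sum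
lemma amountB (ns : List Int) (e : ℕ) (s : Int) :
    ((PySem.List.pyRange 0 (ns.length : Int) 1).foldl (fun (acc : Int × Int) p =>
        let pref := acc.2 + (p + 1) ^ e
        (acc.1 + PySem.List.pyGetD ns p 0 * ((ns.length : Int) - p) * pref, pref)) (s, 0)).1
      = s + ∑ p ∈ Finset.range ns.length, ns.getD p 0 * ((ns.length : Int) - (p : ℤ)) *
          ∑ t ∈ Finset.range (p + 1), ((t : ℤ) + 1) ^ e := by
  rw [PySem.List.pyRange_zero_natCast, List.foldl_map]
  show ((List.range ns.length).foldl (fun (acc : ℤ × ℤ) (p : ℕ) =>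
      (acc.1 + PySem.List.pyGetD ns (↑p) 0 * ((ns.length : Int) - ↑p) * (acc.2 + ((p : ℤ) + 1) ^ e),
       acc.2 + ((p : ℤ) + 1) ^ e)) (s, 0)).1 = _
  rw [amountB_aux]

-- ===== VERDICT (by name: the statement is the Claim_ definition above) =====
theorem alarm_naive_spec : Claim_equal_alarm_naive := by
  intro ns k _
  unfold Spec_alarm_naive alarm_naive alarm_naive_alt
  congr 1
  apply PySem.List.foldl_congr_mem
  intro s ki _
  rw [amountA ns ki.toNat s, amountB ns ki.toNat s,
    main_swap ns.length (fun p => ns.getD p 0) (fun t => (1 + (t : ℤ)) ^ ki.toNat)]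
  congr 1
  apply Finset.sum_congr rfl
  intro p _
  congr 1
  apply Finset.sum_congr rfl
  intro t _
  ring
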